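-- pv_equiv track=rewrite | github.com/EasyArray/phosphorus | phosphorus/__init__.py | combine_multiline
-- ===== SOURCE A (Python) =====
-- def combine_multiline(lines):
--     """ Passes through a list of strings and combines multi-line statements into
--         single strings
--     """
--     new_lines = []
--     for line in lines:
--         if new_lines and line.startswith(' '):
--             new_lines[-1] += line
--         else:
--             new_lines.append(line)
--     return new_lines
-- ===== SOURCE B (Python) =====
-- def combine_multiline(lines):
--     """ Passes through a list of strings and combines multi-line statements into
--         single strings
--     """
--     result = []
--     n = len(lines)
--     i = 0
--     while i < n:
--         j = i + 1
--         while j < n and lines[j].startswith(' '):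
--             j += 1
--         result.append(''.join(lines[i:j]))
--         i = j
--     return result
-- ===== Notes on version B (the rewrite author's own statement) =====
-- stated objective: alternative
-- what changed: B recursively splits the list into statement blocks (a leader line plus its span of indented continuations) and joins each block at once, instead of A's single accumulator pass that repeatedly mutates the last collected element.
import Mathlib
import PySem

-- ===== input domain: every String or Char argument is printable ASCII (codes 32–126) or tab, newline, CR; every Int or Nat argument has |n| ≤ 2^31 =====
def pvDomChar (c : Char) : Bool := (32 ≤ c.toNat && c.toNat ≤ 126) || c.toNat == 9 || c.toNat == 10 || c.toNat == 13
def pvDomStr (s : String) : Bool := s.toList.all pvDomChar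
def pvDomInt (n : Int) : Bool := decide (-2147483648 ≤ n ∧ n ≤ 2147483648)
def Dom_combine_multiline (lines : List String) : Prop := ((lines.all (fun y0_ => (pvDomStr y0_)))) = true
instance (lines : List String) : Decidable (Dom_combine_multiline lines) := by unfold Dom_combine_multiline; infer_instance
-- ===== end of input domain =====

-- ===== PORT A =====
-- A: one pass with an accumulator; an indented line is appended onto the last collected element.
def combine_multiline (lines : List String) : List String :=
  lines.foldl (fun new_lines line =>
    if new_lines ≠ [] ∧ PySem.Str.startswith line " " then
      new_lines.dropLast ++ [new_lines.getLast! ++ line]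
    else new_lines ++ [line]) []

-- ===== PORT B =====
-- B: iterative two-pointer scan; each outer-loop iteration emits one statement block
-- (leader line + its span of indented continuations, joined at once) into `result`.
-- The outer `while i < n` loop is the tail recursion pvAltGo over the remaining lines;
-- the inner `while j < n and ...` scan of the block is the takeWhile/dropWhile split.
def pvAltGo (result : List String) (lines : List String) : List String :=
  match lines with
  | [] => result
  | l :: rest =>
      pvAltGo
        (result ++ [PySem.Str.join "" (l :: rest.takeWhile (fun s => PySem.Str.startswith s " "))])
        (rest.dropWhile (fun s => PySem.Str.startswith s " "))
termination_by lines.length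
decreasing_by
  simp only [List.length_cons]
  exact Nat.lt_succ_of_le (List.length_dropWhile_le _ _)

def combine_multiline_alt (lines : List String) : List String :=
  pvAltGo [] lines

-- ===== PRECONDITION & SPEC =====
def Spec_combine_multiline (lines : List String) (out : List String) : Prop := out = combine_multiline_alt lines
instance (lines : List String) (out : List String) : Decidable (Spec_combine_multiline lines out) := by unfold Spec_combine_multiline; infer_instance

-- ===== CLAIM (what is proved, stated in full; the proofs are below) =====
def Claim_equal_combine_multiline : Prop := ∀ (lines : List String), Dom_combine_multiline lines → Spec_combine_multiline lines (combine_multiline lines)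

-- ===== LEMMAS AND PROOFS =====

-- canonical recursive grouping of the list into joined blocks (proof-only helper)
def pvBlocks (lines : List String) : List String :=
  match lines with
  | [] => []
  | l :: rest =>
      PySem.Str.join "" (l :: rest.takeWhile (fun s => PySem.Str.startswith s " "))
        :: pvBlocks (rest.dropWhile (fun s => PySem.Str.startswith s " "))
termination_by lines.length
decreasing_by
  simp only [List.length_cons]
  exact Nat.lt_succ_of_le (List.length_dropWhile_le _ _)

-- B's accumulator loop computes pvBlocks
theorem pvAltGo_eq (n : Nat) (lines : List String) (hn : lines.length ≤ n)
    (result : List String) : pvAltGo result lines = result ++ pvBlocks lines := by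
  induction n generalizing lines result with
  | zero =>
      have : lines = [] := List.eq_nil_of_length_eq_zero (Nat.le_zero.mp hn)
      subst this; simp [pvAltGo, pvBlocks]
  | succ n ih =>
      cases lines with
      | nil => simp [pvAltGo, pvBlocks]
      | cons l rest =>
          rw [pvAltGo, pvBlocks, ih _ (by
            have := List.length_dropWhile_le (fun s => PySem.Str.startswith s " ") rest
            simp only [List.length_cons, Nat.succ_le_succ_iff] at hn
            omega)]
          simp

-- canonical single-statement accumulator: z is the statement being built, with its leader
def pvGroup (z : String) (lines : List String) : List String :=
  match lines with
  | [] => [z]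
  | l :: rest =>
      if PySem.Str.startswith l " " then pvGroup (z ++ l) rest
      else z :: pvGroup l rest

theorem pvJoin_cons (a : String) (l : List String) :
    PySem.Str.join "" (a :: l) = a ++ PySem.Str.join "" l := by
  apply String.toList_inj.mp
  cases l with
  | nil =>
      simp [PySem.Str.toList_join, PySem.Chars.join_singleton, PySem.Chars.join_nil]
  | cons b t =>
      simp [PySem.Str.toList_join, PySem.Chars.join_cons_cons]

-- pvGroup computes the head block and recurses on the rest
theorem pvGroup_blocks (lines : List String) (z : String) :
    pvGroup z lines
      = PySem.Str.join "" (z :: lines.takeWhile (fun s => PySem.Str.startswith s " "))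
          :: pvBlocks (lines.dropWhile (fun s => PySem.Str.startswith s " ")) := by
  induction lines generalizing z with
  | nil => simp [pvGroup, pvBlocks, PySem.Str.join]
  | cons l rest ih =>
      by_cases h : PySem.Str.startswith l " "
      · simp only [pvGroup, h, if_pos, List.takeWhile_cons, List.dropWhile_cons, ih]
        rw [pvJoin_cons, pvJoin_cons, pvJoin_cons, String.append_assoc]
      · simp only [pvGroup, h, List.takeWhile_cons, List.dropWhile_cons]
        simp only [Bool.false_eq_true, if_false]
        rw [pvJoin_cons, pvBlocks, ih l]
        simp [PySem.Str.join]

-- A's fold from a nonempty accumulator computes the canonical grouping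
theorem pvFold_group (lines : List String) (ys : List String) (z : String) :
    lines.foldl (fun new_lines line =>
      if new_lines ≠ [] ∧ PySem.Str.startswith line " " then
        new_lines.dropLast ++ [new_lines.getLast! ++ line]
      else new_lines ++ [line]) (ys ++ [z]) = ys ++ pvGroup z lines := by
  induction lines generalizing ys z with
  | nil => simp [pvGroup]
  | cons l rest ih =>
      simp only [List.foldl_cons, pvGroup]
      by_cases h : PySem.Str.startswith l " "
      · have hne : ys ++ [z] ≠ [] := by simp
        rw [if_pos ⟨hne, h⟩, if_pos h]
        have h1 : (ys ++ [z]).dropLast = ys := by simp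
        have h2 : (ys ++ [z]).getLast! = z := by
          rw [List.getLast!_eq_getLast?_getD, List.getLast?_concat]; rfl
        rw [h1, h2, ih]
      · rw [if_neg (fun hc => h hc.2), if_neg h]
        have : ys ++ [z] ++ [l] = (ys ++ [z]) ++ [l] := rfl
        rw [this, ih, List.append_assoc]
        rfl

-- ===== VERDICT (by name: the statement is the Claim_ definition above) =====
theorem combine_multiline_spec : Claim_equal_combine_multiline := by
  intro lines _
  unfold Spec_combine_multiline combine_multiline combine_multiline_alt
  rw [pvAltGo_eq lines.length lines (le_refl _) [], List.nil_append]
  cases lines with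
  | nil => simp [pvBlocks]
  | cons l rest =>
      rw [List.foldl_cons]
      rw [if_neg (by simp)]
      rw [show ([] : List String) ++ [l] = [] ++ [l] from rfl, pvFold_group,
        List.nil_append, pvGroup_blocks, pvBlocks]
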